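-- pv_equiv track=rewrite | github.com/fxrcode/LeetPy | Leet/1460_Make_Two_Arrays_Equal_by_Reversing_Sub-arrays.py | minOpsEqual
-- ===== SOURCE A (Python) =====
-- from collections import Counter, deque
-- from typing import List
--
-- def minOpsEqual(target: List[int], arr: List[int]) -> int:
--     """
--     https://leetcode.com/discuss/interview-question/1137426/Facebook-or-Minimizing-Permutations
--     related to 969. Pancake Sorting
--     """
--     arr = "".join([str(n) for n in arr])
--     target = "".join([str(n) for n in target])
--     l = len(arr)
--     q = deque([arr])
--     level = 0
--     visited = set()
--
--     while q:
--         qlen = len(q)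
--         for _ in range(qlen):
--             cur = q.popleft()
--             if cur == target:
--                 return level
--             for i in range(l):
--                 for j in range(i + 1, l):
--                     # your BFS neighbor can be mutated from cur by reverse any subarr
--                     permut = cur[:i] + cur[i : j + 1][::-1] + cur[j + 1 :]
--                     if permut not in visited:
--                         visited.add(permut)
--                         q.append(permut)
--         level += 1
--     return -1
-- ===== SOURCE B (Python) =====
-- def minOpsEqual(target, arr):
--     s = "".join([str(n) for n in arr])
--     t = "".join([str(n) for n in target])
--     # a subarray reversal permutes the characters, and adjacent swaps (length-2
--     # reversals) generate every permutation, so t is reachable from s exactly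
--     # when they have the same character multiset
--     if sorted(s) != sorted(t):
--         return -1
--     l = len(s)
--
--     def dls(c, k):
--         # depth-limited DFS: is t reachable from c in at most k reversals?
--         if c == t:
--             return True
--         if k == 0:
--             return False
--         for i in range(l):
--             for j in range(i + 1, l):
--                 if dls(c[:i] + c[i : j + 1][::-1] + c[j + 1 :], k - 1):
--                     return True
--         return False
--
--     # iterative deepening: the first depth at which t becomes reachable
--     k = 0
--     while True:
--         if dls(s, k):
--             return k
--         k += 1
-- ===== Notes on version B (the rewrite author's own statement) =====
-- stated objective: alternative
-- what changed: Replaces A's queue-plus-visited-set breadth-first search by iterative-deepening depth-limited DFS (no queue, no visited set) preceded by a character-multiset feasibility check (sorted(s) != sorted(t) returns -1 at once, since reversals permute characters and length-2 reversals generate every permutation).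
import Mathlib
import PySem

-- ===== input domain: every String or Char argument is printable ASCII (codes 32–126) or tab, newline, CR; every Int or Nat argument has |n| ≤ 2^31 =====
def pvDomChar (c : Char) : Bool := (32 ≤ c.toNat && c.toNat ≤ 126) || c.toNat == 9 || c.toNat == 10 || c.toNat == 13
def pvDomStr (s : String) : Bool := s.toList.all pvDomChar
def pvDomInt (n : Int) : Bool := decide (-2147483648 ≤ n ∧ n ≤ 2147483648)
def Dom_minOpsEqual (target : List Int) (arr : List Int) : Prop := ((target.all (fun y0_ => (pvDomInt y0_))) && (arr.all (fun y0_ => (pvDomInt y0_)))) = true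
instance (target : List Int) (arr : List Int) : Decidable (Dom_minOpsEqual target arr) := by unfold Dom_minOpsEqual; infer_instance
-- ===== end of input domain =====

-- B replaces A's queue-plus-visited-set BFS by a character-multiset feasibility check
-- (sorted(s) != sorted(t) -> -1) followed by iterative-deepening depth-limited DFS;
-- same return value, not faster.

-- Helpers shared by both ports (both Pythons contain these identical expressions):
-- "".join([str(n) for n in xs])
def pvEncode (xs : List Int) : String := PySem.Str.join "" (xs.map PySem.Int.toStr)
-- cur[:i] + cur[i:j+1][::-1] + cur[j+1:]   (s[::-1] is the reverse: PySem.Str.slice?_none_none_neg_one)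
def pvPermut (c : String) (i j : Int) : String :=
  PySem.Str.slice c none (some i)
    ++ String.ofList (PySem.Str.slice c (some i) (some (j + 1))).toList.reverse
    ++ PySem.Str.slice c (some (j + 1)) none
-- fuel making the two unbounded loops structurally recursive; the state space has at most l!
-- states (every state is a character permutation of the start string), so A's while-loop runs
-- at most l!+2 levels, and the equivalence proof shows B's loop needs no more rounds than A's
def pvFuel (l : Nat) : Nat := Nat.factorial l + 3

-- ===== PORT A =====
-- if permut not in visited: visited.add(permut); q.append(permut)
def pvStep (st : List String × Std.HashSet String) (p : String) :
    List String × Std.HashSet String :=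
  if st.2.contains p then st else (st.1 ++ [p], st.2.insert p)

-- for i in range(l): for j in range(i+1, l): …
def pvExpandOne (l : Int) (cur : String) (st : List String × Std.HashSet String) :
    List String × Std.HashSet String :=
  (PySem.List.pyRange 0 l 1).foldl (fun st i =>
    (PySem.List.pyRange (i + 1) l 1).foldl (fun st j => pvStep st (pvPermut cur i j)) st) st

-- for _ in range(qlen): cur = q.popleft(); if cur == target: return level; …
def pvLevel (t : String) (l : Int) :
    List String → List String × Std.HashSet String → Option (List String × Std.HashSet String)
  | [], st => some st
  | cur :: rest, st => if cur = t then none else pvLevel t l rest (pvExpandOne l cur st)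

-- while q: … level += 1;  return -1
def pvBfs (t : String) (l : Int) : Nat → List String → Std.HashSet String → Int → Int
  | 0, _, _, _ => -1
  | fuel + 1, q, vis, level =>
    if q = [] then -1
    else
      match pvLevel t l q ([], vis) with
      | none => level
      | some (q', vis') => pvBfs t l fuel q' vis' (level + 1)

def minOpsEqual (target : List Int) (arr : List Int) : Int :=
  let a := pvEncode arr
  let tg := pvEncode target
  pvBfs tg (PySem.Str.len a) (pvFuel a.length) [a] ∅ 0

-- ===== PORT B =====
-- def dls(c, k): if c == t: return True; if k == 0: return False;
--   for i in range(l): for j in range(i+1, l): if dls(c[:i]+c[i:j+1][::-1]+c[j+1:], k-1): return True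
--   return False            (the early-returning for-loops are the two `any`s)
def pvDls (t : String) (l : Int) : Nat → String → Bool
  | 0, c => c == t
  | k + 1, c =>
    if c == t then true
    else (PySem.List.pyRange 0 l 1).any fun i =>
      (PySem.List.pyRange (i + 1) l 1).any fun j => pvDls t l k (pvPermut c i j)

-- k = 0; while True: if dls(s, k): return k; k += 1
-- (Python's loop is unbounded; the fuel only makes it structurally recursive — the
-- equivalence proof shows the -1 default is what A computes whenever it is reached)
def pvIddfs (t : String) (l : Int) (s : String) : Nat → Nat → Int
  | 0, _ => -1
  | fuel + 1, k => if pvDls t l k s then (k : Int) else pvIddfs t l s fuel (k + 1)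

-- if sorted(s) != sorted(t): return -1
def minOpsEqual_alt (target : List Int) (arr : List Int) : Int :=
  let s := pvEncode arr
  let t := pvEncode target
  if PySem.List.sorted s.toList (fun c => c) ≠ PySem.List.sorted t.toList (fun c => c) then -1
  else pvIddfs t (PySem.Str.len s) s (pvFuel s.length) 0

-- ===== PRECONDITION & SPEC =====
def Spec_minOpsEqual (target : List Int) (arr : List Int) (out : Int) : Prop := out = minOpsEqual_alt target arr
instance (target : List Int) (arr : List Int) (out : Int) : Decidable (Spec_minOpsEqual target arr out) := by unfold Spec_minOpsEqual; infer_instance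

-- ===== CLAIM (what is proved, stated in full; the proofs are below) =====
def Claim_equal_minOpsEqual : Prop := ∀ (target : List Int) (arr : List Int), Dom_minOpsEqual target arr → Spec_minOpsEqual target arr (minOpsEqual target arr)

-- ===== LEMMAS AND PROOFS =====

-- the list of neighbours a state generates (both ports enumerate exactly these)
def pvNbrs (l : Int) (c : String) : List String :=
  (PySem.List.pyRange 0 l 1).flatMap fun i =>
    (PySem.List.pyRange (i + 1) l 1).map fun j => pvPermut c i j

-- near-end reachability: from c, at most k reversals reach t (what dls decides)
def pvRch (l : Int) (t : String) : Nat → String → Prop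
  | 0, c => c = t
  | k + 1, c => c = t ∨ ∃ n ∈ pvNbrs l c, pvRch l t k n

-- far-end reachability: the ball of radius k around s (what BFS layers cover)
def pvBall (l : Int) (s : String) : Nat → String → Prop
  | 0, x => x = s
  | k + 1, x => pvBall l s k x ∨ ∃ c, pvBall l s k c ∧ x ∈ pvNbrs l c

-- the abstract (set-level) queue/visited pair of A's BFS after k levels
def pvQV (l : Int) (s : String) : Nat → (String → Prop) × (String → Prop)
  | 0 => (fun x => x = s, fun _ => False)
  | k + 1 =>
    (fun x => (∃ c, (pvQV l s k).1 c ∧ x ∈ pvNbrs l c) ∧ ¬ (pvQV l s k).2 x,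
     fun x => (pvQV l s k).2 x ∨ ∃ c, (pvQV l s k).1 c ∧ x ∈ pvNbrs l c)

lemma mem_pvNbrs (l : Int) (c x : String) :
    x ∈ pvNbrs l c ↔ ∃ i ∈ PySem.List.pyRange 0 l 1, ∃ j ∈ PySem.List.pyRange (i + 1) l 1,
      x = pvPermut c i j := by
  simp [pvNbrs, List.mem_flatMap, eq_comm]

lemma pvDls_iff (t : String) (l : Int) : ∀ (k : Nat) (c : String),
    pvDls t l k c = true ↔ pvRch l t k c := by
  intro k
  induction k with
  | zero => intro c; simp [pvDls, pvRch]
  | succ k ih =>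
    intro c
    by_cases hc : c = t
    · simp [pvDls, pvRch, hc]
    · simp only [pvDls, pvRch, beq_iff_eq, hc, if_false, false_or, List.any_eq_true]
      constructor
      · rintro ⟨i, hi, j, hj, hd⟩
        exact ⟨pvPermut c i j, (mem_pvNbrs l c _).mpr ⟨i, hi, j, hj, rfl⟩, (ih _).mp hd⟩
      · rintro ⟨n, hn, hr⟩
        rcases (mem_pvNbrs l c n).mp hn with ⟨i, hi, j, hj, rfl⟩
        exact ⟨i, hi, j, hj, (ih _).mpr hr⟩



lemma pvBall_self (l : Int) (s : String) : ∀ k, pvBall l s k s := by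
  intro k
  induction k with
  | zero => rfl
  | succ k ih => exact Or.inl ih


lemma pvBall_peel (l : Int) (s : String) : ∀ (k : Nat) (x : String),
    pvBall l s (k + 1) x ↔ x = s ∨ ∃ n ∈ pvNbrs l s, pvBall l n k x := by
  intro k
  induction k with
  | zero =>
    intro x
    simp only [pvBall]
    constructor
    · rintro (h | ⟨c, rfl, hc⟩)
      · exact Or.inl h
      · exact Or.inr ⟨x, hc, rfl⟩
    · rintro (h | ⟨n, hn, rfl⟩)
      · exact Or.inl h
      · exact Or.inr ⟨s, rfl, hn⟩
  | succ k ih =>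
    intro x
    constructor
    · rintro (h | ⟨c, hc, hxc⟩)
      · rcases (ih x).mp h with h | ⟨n, hn, hb⟩
        · exact Or.inl h
        · exact Or.inr ⟨n, hn, Or.inl hb⟩
      · rcases (ih c).mp hc with rfl | ⟨n, hn, hb⟩
        · exact Or.inr ⟨x, hxc, pvBall_self l x (k + 1)⟩
        · exact Or.inr ⟨n, hn, Or.inr ⟨c, hb, hxc⟩⟩
    · rintro (rfl | ⟨n, hn, hb⟩)
      · exact Or.inl ((ih x).mpr (Or.inl rfl))
      · rcases hb with hb | ⟨c, hb, hxc⟩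
        · exact Or.inl ((ih x).mpr (Or.inr ⟨n, hn, hb⟩))
        · exact Or.inr ⟨c, (ih c).mpr (Or.inr ⟨n, hn, hb⟩), hxc⟩


lemma pvRch_ball (l : Int) (t : String) : ∀ (k : Nat) (s : String),
    pvRch l t k s ↔ pvBall l s k t := by
  intro k
  induction k with
  | zero => intro s; simp [pvRch, pvBall, eq_comm]
  | succ k ih =>
    intro s
    rw [pvBall_peel]
    constructor
    · rintro (h | ⟨n, hn, hr⟩)
      · exact Or.inl h.symm
      · exact Or.inr ⟨n, hn, (ih n).mp hr⟩
    · rintro (h | ⟨n, hn, hb⟩)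
      · exact Or.inl h.symm
      · exact Or.inr ⟨n, hn, (ih n).mpr hb⟩


lemma pvQ_sub_ball (l : Int) (s : String) : ∀ (k : Nat) (x : String),
    (pvQV l s k).1 x → pvBall l s k x := by
  intro k
  induction k with
  | zero => intro x h; exact h
  | succ k ih =>
    rintro x ⟨⟨c, hc, hxc⟩, -⟩
    exact Or.inr ⟨c, ih c hc, hxc⟩


lemma pvV_iff (l : Int) (s : String) : ∀ (k : Nat) (x : String),
    (pvQV l s k).2 x ↔ ∃ j, j < k ∧ ∃ c, (pvQV l s j).1 c ∧ x ∈ pvNbrs l c := by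
  intro k
  induction k with
  | zero => intro x; simp [pvQV]
  | succ k ih =>
    intro x
    simp only [pvQV]
    rw [ih x]
    constructor
    · rintro (⟨j, hj, hx⟩ | hx)
      · exact ⟨j, by omega, hx⟩
      · exact ⟨k, by omega, hx⟩
    · rintro ⟨j, hj, hx⟩
      rcases Nat.lt_succ_iff_lt_or_eq.mp hj with hj | rfl
      · exact Or.inl ⟨j, hj, hx⟩
      · exact Or.inr hx


lemma pvNbrQ_to_Q (l : Int) (s : String) : ∀ (j : Nat) (x : String),
    (∃ c, (pvQV l s j).1 c ∧ x ∈ pvNbrs l c) → ∃ i, i ≤ j + 1 ∧ (pvQV l s i).1 x := by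
  intro j
  induction j using Nat.strong_induction_on with
  | h j ihs =>
    intro x hx
    by_cases hv : (pvQV l s j).2 x
    · rcases (pvV_iff l s j x).mp hv with ⟨j', hj', hx'⟩
      rcases ihs j' hj' x hx' with ⟨i, hi, hQ⟩
      exact ⟨i, by omega, hQ⟩
    · exact ⟨j + 1, le_refl _, ⟨hx, hv⟩⟩


lemma pvBall_to_Q (l : Int) (s : String) : ∀ (k : Nat) (x : String),
    pvBall l s k x → ∃ i, i ≤ k ∧ (pvQV l s i).1 x := by
  intro k
  induction k with
  | zero => intro x h; exact ⟨0, le_refl _, h⟩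
  | succ k ih =>
    rintro x (h | ⟨c, hc, hxc⟩)
    · rcases ih x h with ⟨i, hi, hQ⟩
      exact ⟨i, by omega, hQ⟩
    · rcases ih c hc with ⟨i, hi, hQ⟩
      rcases pvNbrQ_to_Q l s i x ⟨c, hQ, hxc⟩ with ⟨i', hi', hQ'⟩
      exact ⟨i', by omega, hQ'⟩


lemma pvQempty_mono (l : Int) (s : String) (k : Nat) (h : ∀ x, ¬ (pvQV l s k).1 x) :
    ∀ m, k ≤ m → ∀ x, ¬ (pvQV l s m).1 x := by
  intro m
  induction m with
  | zero => intro hm; interval_cases k; exact h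
  | succ m ih =>
    intro hm x
    rcases Nat.le_succ_iff.mp hm with hm | rfl
    · rintro ⟨⟨c, hc, -⟩, -⟩
      exact ih hm c hc
    · exact h x


lemma pvIddfs_neg (t : String) (l : Int) (s : String) (h : ∀ j, ¬ pvRch l t j s) :
    ∀ (fuel k : Nat), pvIddfs t l s fuel k = -1 := by
  intro fuel
  induction fuel with
  | zero => intro k; rfl
  | succ fuel ih =>
    intro k
    have hd : ¬ (pvDls t l k s = true) := fun hh => h k ((pvDls_iff t l k s).mp hh)
    simp only [pvIddfs, Bool.not_eq_true] at hd ⊢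
    rw [hd, if_neg (by simp)]
    exact ih (k + 1)


-- the append-if-unvisited fold, membership-wise
lemma pvFold_mem (ps : List String) (q : List String) (v : Std.HashSet String) :
    (∀ x, x ∈ (ps.foldl pvStep (q, v)).1 ↔ x ∈ q ∨ (x ∈ ps ∧ x ∉ v)) ∧
    (∀ x, x ∈ (ps.foldl pvStep (q, v)).2 ↔ x ∈ v ∨ x ∈ ps) := by
  induction ps generalizing q v with
  | nil => simp
  | cons p rest ih =>
    by_cases hp : p ∈ v
    · have hs : pvStep (q, v) p = (q, v) := by
        simp [pvStep, Std.HashSet.contains_iff_mem, hp]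
      constructor
      · intro x
        rw [List.foldl_cons, hs, (ih q v).1 x]
        constructor
        · rintro (h | ⟨h1, h2⟩)
          · exact Or.inl h
          · exact Or.inr ⟨List.mem_cons_of_mem _ h1, h2⟩
        · rintro (h | ⟨h1, h2⟩)
          · exact Or.inl h
          · rcases List.mem_cons.mp h1 with rfl | h1
            · exact absurd hp h2
            · exact Or.inr ⟨h1, h2⟩
      · intro x
        rw [List.foldl_cons, hs, (ih q v).2 x]
        constructor
        · rintro (h | h)
          · exact Or.inl h
          · exact Or.inr (List.mem_cons_of_mem _ h)
        · rintro (h | h)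
          · exact Or.inl h
          · rcases List.mem_cons.mp h with rfl | h
            · exact Or.inl hp
            · exact Or.inr h
    · have hs : pvStep (q, v) p = (q ++ [p], v.insert p) := by
        simp [pvStep, Std.HashSet.contains_iff_mem, hp]
      constructor
      · intro x
        rw [List.foldl_cons, hs, (ih _ _).1 x]
        simp only [List.mem_append, List.mem_cons, List.not_mem_nil, or_false,
          Std.HashSet.mem_insert, beq_iff_eq]
        constructor
        · rintro ((h | rfl) | ⟨h1, h2⟩)
          · exact Or.inl h
          · exact Or.inr ⟨Or.inl rfl, hp⟩
          · exact Or.inr ⟨Or.inr h1, fun hv => h2 (Or.inr hv)⟩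
        · rintro (h | ⟨(rfl | h1), h2⟩)
          · exact Or.inl (Or.inl h)
          · exact Or.inl (Or.inr rfl)
          · by_cases hxp : x = p
            · exact Or.inl (Or.inr hxp)
            · exact Or.inr ⟨h1, fun hv => hv.elim (fun a => hxp a.symm) h2⟩
      · intro x
        rw [List.foldl_cons, hs, (ih _ _).2 x]
        simp only [Std.HashSet.mem_insert, beq_iff_eq, List.mem_cons]
        tauto

-- the i/j double loop is the fold over the neighbour list
lemma pvExpandOne_eq (l : Int) (cur : String) (st : List String × Std.HashSet String) :
    pvExpandOne l cur st = (pvNbrs l cur).foldl pvStep st := by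
  simp [pvExpandOne, pvNbrs, List.foldl_flatMap, List.foldl_map]

-- one BFS level raises (finds the target) iff the target sits in the level's queue
lemma pvLevel_none (t : String) (l : Int) (q : List String) (h : t ∈ q) :
    ∀ st, pvLevel t l q st = none := by
  induction q with
  | nil => cases h
  | cons c rest ih =>
    intro st
    rcases List.mem_cons.mp h with rfl | h
    · simp [pvLevel]
    · by_cases hc : c = t
      · simp [pvLevel, hc]
      · simp only [pvLevel, hc, if_false]
        exact ih h _

lemma pvLevel_some (t : String) (l : Int) (q : List String) (h : t ∉ q) :
    ∀ acc v, ∃ q' v', pvLevel t l q (acc, v) = some (q', v') ∧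
      (∀ x, x ∈ q' ↔ x ∈ acc ∨ ((∃ c ∈ q, x ∈ pvNbrs l c) ∧ x ∉ v)) ∧
      (∀ x, x ∈ v' ↔ x ∈ v ∨ ∃ c ∈ q, x ∈ pvNbrs l c) := by
  induction q with
  | nil =>
    intro acc v
    exact ⟨acc, v, rfl, by simp, by simp⟩
  | cons c rest ih =>
    intro acc v
    have hct : ¬ (c = t) := fun hEq => h (hEq ▸ List.mem_cons_self)
    have hrest : t ∉ rest := fun hr => h (List.mem_cons_of_mem _ hr)
    obtain ⟨q', v', heq, hq', hv'⟩ :=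
      ih hrest (pvExpandOne l c (acc, v)).1 (pvExpandOne l c (acc, v)).2
    refine ⟨q', v', ?_, ?_, ?_⟩
    · simpa [pvLevel, hct] using heq
    · intro x
      rw [hq' x, pvExpandOne_eq, (pvFold_mem _ _ _).1 x, (pvFold_mem _ _ _).2 x]
      constructor
      · rintro ((ha | ⟨h1, h2⟩) | ⟨⟨d, hd, hxd⟩, h2⟩)
        · exact Or.inl ha
        · exact Or.inr ⟨⟨c, List.mem_cons_self, h1⟩, h2⟩
        · exact Or.inr ⟨⟨d, List.mem_cons_of_mem _ hd, hxd⟩, fun hv => h2 (Or.inl hv)⟩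
      · rintro (ha | ⟨⟨d, hd, hxd⟩, h2⟩)
        · exact Or.inl (Or.inl ha)
        · rcases List.mem_cons.mp hd with rfl | hd
          · exact Or.inl (Or.inr ⟨hxd, h2⟩)
          · by_cases hxc : x ∈ pvNbrs l c
            · exact Or.inl (Or.inr ⟨hxc, h2⟩)
            · exact Or.inr ⟨⟨d, hd, hxd⟩, fun hv => hv.elim h2 hxc⟩
    · intro x
      rw [hv' x, pvExpandOne_eq, (pvFold_mem _ _ _).2 x]
      constructor
      · rintro ((hv | hc') | ⟨d, hd, hxd⟩)
        · exact Or.inl hv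
        · exact Or.inr ⟨c, List.mem_cons_self, hc'⟩
        · exact Or.inr ⟨d, List.mem_cons_of_mem _ hd, hxd⟩
      · rintro (hv | ⟨d, hd, hxd⟩)
        · exact Or.inl (Or.inl hv)
        · rcases List.mem_cons.mp hd with rfl | hd
          · exact Or.inl (Or.inr hxd)
          · exact Or.inr ⟨d, hd, hxd⟩

-- lockstep: A's fueled BFS at level k equals B's fueled deepening loop at depth k
lemma pvMain (t : String) (l : Int) (s : String) :
    ∀ (fuel k : Nat) (q : List String) (v : Std.HashSet String),
      (∀ x, x ∈ q ↔ (pvQV l s k).1 x) →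
      (∀ x, x ∈ v ↔ (pvQV l s k).2 x) →
      (∀ j, j < k → ¬ pvRch l t j s) →
      pvBfs t l fuel q v (k : Int) = pvIddfs t l s fuel k := by
  intro fuel
  induction fuel with
  | zero => intro k q v _ _ _; rfl
  | succ m ih =>
    intro k q v hq hv hnot
    by_cases hre : pvRch l t k s
    · -- target is reached at this exact level on both sides
      have hdls : pvDls t l k s = true := (pvDls_iff t l k s).mpr hre
      have htQ : (pvQV l s k).1 t := by
        rcases pvBall_to_Q l s k t ((pvRch_ball l t k s).mp hre) with ⟨i, hik, hQ⟩
        rcases Nat.lt_or_ge i k with hlt | hge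
        · exact absurd ((pvRch_ball l t i s).mpr (pvQ_sub_ball l s i t hQ)) (hnot i hlt)
        · have hik' : i = k := by omega
          exact hik' ▸ hQ
      have htq : t ∈ q := (hq t).mpr htQ
      have hnil : q ≠ [] := List.ne_nil_of_mem htq
      simp [pvBfs, hnil, pvLevel_none t l q htq, pvIddfs, hdls]
    · have hdls : pvDls t l k s = false := by
        cases hcase : pvDls t l k s
        · rfl
        · exact absurd ((pvDls_iff t l k s).mp hcase) hre
      by_cases hnil : q = []
      · subst hnil
        have hQe : ∀ x, ¬ (pvQV l s k).1 x := fun x hx => by simpa using (hq x).mpr hx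
        have hall : ∀ j, ¬ pvRch l t j s := by
          intro j hr
          rcases pvBall_to_Q l s j t ((pvRch_ball l t j s).mp hr) with ⟨i, hij, hQ⟩
          rcases Nat.lt_or_ge i k with hlt | hge
          · exact hnot i hlt ((pvRch_ball l t i s).mpr (pvQ_sub_ball l s i t hQ))
          · exact pvQempty_mono l s k hQe i hge t hQ
        rw [pvIddfs_neg t l s hall]
        simp [pvBfs]
      · have htq : t ∉ q := fun hh =>
          hre ((pvRch_ball l t k s).mpr (pvQ_sub_ball l s k t ((hq t).mp hh)))
        obtain ⟨q', v', heq, hq', hv'⟩ := pvLevel_some t l q htq [] v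
        have hq'' : ∀ x, x ∈ q' ↔ (pvQV l s (k + 1)).1 x := by
          intro x
          rw [hq' x]
          simp only [List.not_mem_nil, false_or, pvQV]
          constructor
          · rintro ⟨⟨c, hc, hxc⟩, hxv⟩
            exact ⟨⟨c, (hq c).mp hc, hxc⟩, fun hv2 => hxv ((hv x).mpr hv2)⟩
          · rintro ⟨⟨c, hc, hxc⟩, hxv⟩
            exact ⟨⟨c, (hq c).mpr hc, hxc⟩, fun hv2 => hxv ((hv x).mp hv2)⟩
        have hv'' : ∀ x, x ∈ v' ↔ (pvQV l s (k + 1)).2 x := by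
          intro x
          rw [hv' x]
          simp only [pvQV]
          constructor
          · rintro (hv2 | ⟨c, hc, hxc⟩)
            · exact Or.inl ((hv x).mp hv2)
            · exact Or.inr ⟨c, (hq c).mp hc, hxc⟩
          · rintro (hv2 | ⟨c, hc, hxc⟩)
            · exact Or.inl ((hv x).mpr hv2)
            · exact Or.inr ⟨c, (hq c).mpr hc, hxc⟩
        have hnot' : ∀ j, j < k + 1 → ¬ pvRch l t j s := by
          intro j hj
          rcases Nat.lt_succ_iff_lt_or_eq.mp hj with hj | rfl
          · exact hnot j hj
          · exact hre
        have hcast : (k : Int) + 1 = ((k + 1 : Nat) : Int) := by push_cast; ring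
        simp only [pvBfs, hnil, if_false, heq, pvIddfs, hdls, Bool.false_eq_true, hcast]
        exact ih (k + 1) q' v' hq'' hv'' hnot' 

-- a neighbour is a character permutation (the three slices partition the string)
lemma pvNbr_perm (l : Int) (c x : String) (hx : x ∈ pvNbrs l c) :
    x.toList.Perm c.toList := by
  rcases (mem_pvNbrs l c x).mp hx with ⟨i, hi, j, hj, rfl⟩
  rw [PySem.List.mem_pyRange_one] at hi hj
  obtain ⟨iN, rfl⟩ : ∃ iN : Nat, i = (iN : Int) := ⟨i.toNat, (Int.toNat_of_nonneg hi.1).symm⟩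
  obtain ⟨jN, rfl⟩ : ∃ jN : Nat, j = (jN : Int) := ⟨j.toNat, (Int.toNat_of_nonneg (by omega)).symm⟩
  have hij : iN ≤ jN + 1 := by omega
  have hperm : (pvPermut c (iN : Int) (jN : Int)).toList =
      c.toList.take iN ++ ((c.toList.drop iN).take (jN + 1 - iN)).reverse
        ++ c.toList.drop (jN + 1) := by
    have hc1 : ((jN : Int) + 1) = ((jN + 1 : Nat) : Int) := by push_cast; ring
    simp only [pvPermut, String.toList_append, String.toList_ofList, PySem.Str.toList_slice,
      PySem.Chars.slice_eq_listSlice, hc1, PySem.List.slice_to_natCast,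
      PySem.List.slice_from_natCast, PySem.List.slice_natCast]
  rw [hperm]
  have h2 : c.toList.take iN ++ ((c.toList.drop iN).take (jN + 1 - iN) ++ c.toList.drop (jN + 1)) =
      c.toList := by
    have hdd : c.toList.drop (jN + 1) = ((c.toList.drop iN).drop (jN + 1 - iN)) := by
      rw [List.drop_drop]
      congr 1
      omega
    rw [hdd, List.take_append_drop, List.take_append_drop]
  have hp : (c.toList.take iN ++ ((c.toList.drop iN).take (jN + 1 - iN)).reverse
      ++ c.toList.drop (jN + 1)).Perm
      (c.toList.take iN ++ ((c.toList.drop iN).take (jN + 1 - iN) ++ c.toList.drop (jN + 1))) := by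
    rw [List.append_assoc]
    exact ((List.reverse_perm _).append_right _).append_left _
  exact hp.trans (List.perm_iff_count.mpr fun ch => congrArg (List.count ch) h2)

-- everything reachable is a character permutation
lemma pvRch_perm (l : Int) (t : String) : ∀ (k : Nat) (c : String),
    pvRch l t k c → c.toList.Perm t.toList := by
  intro k
  induction k with
  | zero => intro c h; exact h ▸ List.Perm.refl _
  | succ k ih =>
    rintro c (rfl | ⟨n, hn, hr⟩)
    · exact List.Perm.refl _
    · exact (pvNbr_perm l c n hn).symm.trans (ih n hr)

-- ===== VERDICT (by name: the statement is the Claim_ definition above) =====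
theorem minOpsEqual_spec : Claim_equal_minOpsEqual := by
  intro target arr _
  unfold Spec_minOpsEqual minOpsEqual minOpsEqual_alt
  dsimp only
  have hmain : pvBfs (pvEncode target) (PySem.Str.len (pvEncode arr))
      (pvFuel (pvEncode arr).length) [pvEncode arr] ∅ ((0 : Nat) : Int) =
      pvIddfs (pvEncode target) (PySem.Str.len (pvEncode arr)) (pvEncode arr)
        (pvFuel (pvEncode arr).length) 0 := by
    apply pvMain
    · intro x; simp [pvQV]
    · intro x; simp [pvQV]
    · intro j hj; omega
  simp only [Nat.cast_zero] at hmain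
  rw [hmain]
  split_ifs with hne
  · apply pvIddfs_neg
    intro j hr
    exact hne ((PySem.List.sorted_id_eq_sorted_id_iff_perm _ _).mpr
      (pvRch_perm _ (pvEncode target) j (pvEncode arr) hr))
  · rfl
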